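-- pv_equiv track=rewrite | github.com/sps-tech-lab/rp2-firmware-template | scripts/pico_size_tool.py | sum_matching
-- ===== SOURCE A (Python) =====
-- def sum_matching(sections: dict, patterns):
--     """
--     patterns: list of globs or exact names; supports simple prefixes with trailing '*'
--     """
--     total = 0
--     for pat in patterns:
--         if pat.endswith(".*"):
--             prefix = pat[:-2]
--             for name, val in sections.items():
--                 if name.startswith(prefix):
--                     total += val
--         else:
--             total += sections.get(pat, 0)
--     return total
-- ===== SOURCE B (Python) =====
-- def sum_matching(sections: dict, patterns):
--     """
--     patterns: list of globs or exact names; supports simple prefixes with trailing '*'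
--     """
--     exact = {}
--     prefixes = []
--     for pat in patterns:
--         if pat.endswith(".*"):
--             prefixes.append(pat[:-2])
--         else:
--             exact[pat] = exact.get(pat, 0) + 1
--     total = 0
--     for name, val in sections.items():
--         total += val * (exact.get(name, 0) + sum(1 for p in prefixes if name.startswith(p)))
--     return total
-- ===== Notes on version B (the rewrite author's own statement) =====
-- stated objective: alternative
-- what changed: Loop order inverted: patterns are pre-bucketed once into an exact-name counter and a prefix list, then a single pass over the sections weights each value by its match multiplicity, instead of re-scanning the sections for every prefix pattern.
import Mathlib
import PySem

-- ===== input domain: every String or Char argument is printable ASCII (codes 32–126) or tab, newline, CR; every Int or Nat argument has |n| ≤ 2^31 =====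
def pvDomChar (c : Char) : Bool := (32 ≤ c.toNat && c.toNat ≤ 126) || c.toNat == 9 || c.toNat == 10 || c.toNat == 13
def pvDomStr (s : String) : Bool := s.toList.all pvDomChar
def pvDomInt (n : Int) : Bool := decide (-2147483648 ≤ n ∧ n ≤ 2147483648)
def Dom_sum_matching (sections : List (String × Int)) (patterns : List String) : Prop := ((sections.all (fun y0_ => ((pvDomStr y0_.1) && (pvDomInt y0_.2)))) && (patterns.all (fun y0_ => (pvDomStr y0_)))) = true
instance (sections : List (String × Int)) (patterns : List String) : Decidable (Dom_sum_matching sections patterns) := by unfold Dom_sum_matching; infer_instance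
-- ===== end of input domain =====

-- B inverts the loop order: patterns are pre-bucketed into an exact-name counter and a
-- prefix list, then one pass over the sections weights each value by its match count
-- (objective: alternative; same results, proved equal on dicts with distinct keys).

-- ===== PORT A =====
def sum_matching (sections : List (String × Int)) (patterns : List String) : Int :=
  patterns.foldl (fun total pat =>
    if PySem.Str.endswith pat ".*" then
      let pref := PySem.Str.slice pat none (some (-2))
      sections.foldl (fun t nv => if PySem.Str.startswith nv.1 pref then t + nv.2 else t) total
    else
      total + (PySem.Dict.mk sections).getD pat 0) 0

-- ===== PORT B =====
def sum_matching_alt (sections : List (String × Int)) (patterns : List String) : Int :=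
  let ep := patterns.foldl (fun (ep : PySem.Dict String Int × List String) pat =>
      if PySem.Str.endswith pat ".*" then (ep.1, ep.2 ++ [PySem.Str.slice pat none (some (-2))])
      else (ep.1.modify pat 0 (· + 1), ep.2)) (PySem.Dict.empty, [])
  sections.foldl (fun t nv =>
    t + nv.2 * (ep.1.getD nv.1 0 + ((ep.2.countP (fun p => PySem.Str.startswith nv.1 p)) : Int))) 0

-- ===== PRECONDITION & SPEC =====
-- Pre_ excludes association lists with duplicate section names: A's parameter is a Python
-- dict, in which duplicate keys cannot occur, so the list representation is only faithful
-- when the keys are distinct.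
def Pre_sum_matching (sections : List (String × Int)) (patterns : List String) : Prop :=
  (sections.map Prod.fst).Nodup
instance (sections : List (String × Int)) (patterns : List String) : Decidable (Pre_sum_matching sections patterns) := by unfold Pre_sum_matching; infer_instance

def pvWitness_sum_matching : (List (String × Int)) × List String :=
  ([(".text", 120), (".data", 8), (".bss", 4)], [".text", ".d.*"])

def Spec_sum_matching (sections : List (String × Int)) (patterns : List String) (out : Int) : Prop := out = sum_matching_alt sections patterns
instance (sections : List (String × Int)) (patterns : List String) (out : Int) : Decidable (Spec_sum_matching sections patterns out) := by unfold Spec_sum_matching; infer_instance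

-- ===== CLAIM (what is proved, stated in full; the proofs are below) =====
def Claim_equal_sum_matching : Prop := ∀ (sections : List (String × Int)) (patterns : List String), Dom_sum_matching sections patterns → Pre_sum_matching sections patterns → Spec_sum_matching sections patterns (sum_matching sections patterns)

-- ===== LEMMAS AND PROOFS =====

-- whether pattern `pat` matches section name `n` (A's two branches in one predicate)
def pvMatch (n pat : String) : Bool :=
  if PySem.Str.endswith pat ".*" then PySem.Str.startswith n (PySem.Str.slice pat none (some (-2)))
  else n == pat

-- the pre-bucketing fold from B's port, named for the lemmas below
def pvBucket (patterns : List String) : PySem.Dict String Int × List String :=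
  patterns.foldl (fun (ep : PySem.Dict String Int × List String) pat =>
      if PySem.Str.endswith pat ".*" then (ep.1, ep.2 ++ [PySem.Str.slice pat none (some (-2))])
      else (ep.1.modify pat 0 (· + 1), ep.2)) (PySem.Dict.empty, [])

-- A's inner loop over the sections, as a sum
theorem pv_innerA (sections : List (String × Int)) (pref : String) (t : Int) :
    sections.foldl (fun t nv => if PySem.Str.startswith nv.1 pref then t + nv.2 else t) t
      = t + (sections.map (fun nv => if PySem.Str.startswith nv.1 pref then nv.2 else 0)).sum := by
  induction sections generalizing t with
  | nil => simp
  | cons nv rest ih =>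
    rw [List.foldl_cons, List.map_cons, List.sum_cons]
    split_ifs <;> rw [ih] <;> ring

theorem pv_sum_zero_of_not_mem (sections : List (String × Int)) (pat : String)
    (h : pat ∉ sections.map Prod.fst) :
    (sections.map (fun nv => if nv.1 == pat then nv.2 else 0)).sum = 0 := by
  induction sections with
  | nil => simp
  | cons nv rest ih =>
    simp only [List.map_cons, List.mem_cons, not_or] at h
    rw [List.map_cons, List.sum_cons, if_neg (by simpa using Ne.symm h.1), ih h.2, add_zero]

-- dict lookup on a dup-free association list, as a sum
theorem pv_getD_eq_sum (sections : List (String × Int)) (pat : String)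
    (h : (sections.map Prod.fst).Nodup) :
    (PySem.Dict.mk sections).getD pat 0
      = (sections.map (fun nv => if nv.1 == pat then nv.2 else 0)).sum := by
  induction sections with
  | nil => simp [PySem.Dict.getD, PySem.Dict.get?]
  | cons nv rest ih =>
    obtain ⟨k, v⟩ := nv
    simp only [List.map_cons, List.nodup_cons] at h
    rw [PySem.Dict.getD_eq_get?_getD, PySem.Dict.get?_mk_cons]
    by_cases hk : (k == pat) = true
    · have hkp : k = pat := by simpa using hk
      rw [if_pos hk, List.map_cons, List.sum_cons, if_pos hk,
        pv_sum_zero_of_not_mem rest pat (hkp ▸ h.1), add_zero]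
      rfl
    · rw [if_neg hk, List.map_cons, List.sum_cons, if_neg hk, zero_add,
        ← PySem.Dict.getD_eq_get?_getD, ih h.2]

-- A as a pattern-major double sum
theorem pv_A_eq (sections : List (String × Int)) (patterns : List String)
    (h : (sections.map Prod.fst).Nodup) :
    sum_matching sections patterns
      = (patterns.map (fun pat =>
          (sections.map (fun nv => if pvMatch nv.1 pat then nv.2 else 0)).sum)).sum := by
  unfold sum_matching
  suffices H : ∀ (ps : List String) (t : Int),
      ps.foldl (fun total pat =>
        if PySem.Str.endswith pat ".*" then
          let pref := PySem.Str.slice pat none (some (-2))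
          sections.foldl (fun t nv => if PySem.Str.startswith nv.1 pref then t + nv.2 else t) total
        else
          total + (PySem.Dict.mk sections).getD pat 0) t
      = t + (ps.map (fun pat =>
          (sections.map (fun nv => if pvMatch nv.1 pat then nv.2 else 0)).sum)).sum by
    rw [H patterns 0, zero_add]
  intro ps
  induction ps with
  | nil => intro t; simp
  | cons pat rest ih =>
    intro t
    rw [List.foldl_cons, List.map_cons, List.sum_cons]
    by_cases he : PySem.Str.endswith pat ".*" = true
    · rw [if_pos he]
      have hz : (let pref := PySem.Str.slice pat none (some (-2));
          sections.foldl (fun t nv => if PySem.Str.startswith nv.1 pref then t + nv.2 else t) t)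
        = sections.foldl (fun t nv =>
            if PySem.Str.startswith nv.1 (PySem.Str.slice pat none (some (-2))) then t + nv.2 else t) t := rfl
      rw [hz, pv_innerA, ih]
      have : (fun nv : String × Int => if pvMatch nv.1 pat then nv.2 else 0)
          = fun nv => if PySem.Str.startswith nv.1 (PySem.Str.slice pat none (some (-2))) then nv.2 else 0 := by
        funext nv; simp only [pvMatch, if_pos he]
      rw [this]; ring
    · rw [if_neg he, ih, pv_getD_eq_sum sections pat h]
      have : (fun nv : String × Int => if pvMatch nv.1 pat then nv.2 else 0)
          = fun nv => if nv.1 == pat then nv.2 else 0 := by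
        funext nv; simp only [pvMatch, if_neg he]
      rw [this]; ring

-- swap the two sums
theorem pv_sum_comm (l1 : List String) (l2 : List (String × Int)) (g : String → (String × Int) → Int) :
    (l1.map (fun a => (l2.map (g a)).sum)).sum
      = (l2.map (fun b => (l1.map (fun a => g a b)).sum)).sum := by
  induction l1 with
  | nil => simp
  | cons a rest ih =>
    rw [List.map_cons, List.sum_cons, ih]
    have := PySem.List.sum_map_add_int l2 (fun b => g a b)
      (fun b => (rest.map (fun a' => g a' b)).sum)
    rw [← this]
    congr 1

-- inner pattern sum as value times match count
theorem pv_sum_ite_count (ps : List String) (n : String) (v : Int) :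
    (ps.map (fun pat => if pvMatch n pat then v else 0)).sum
      = v * (ps.countP (fun pat => pvMatch n pat) : Int) := by
  induction ps with
  | nil => simp
  | cons pat rest ih =>
    rw [List.map_cons, List.sum_cons, ih, List.countP_cons]
    by_cases h : pvMatch n pat = true <;> simp [h] <;> push_cast <;> ring

-- B's pre-bucketing fold: resulting multiplicity of a name
theorem pv_B_mult_gen (patterns : List String) (d : PySem.Dict String Int) (ps : List String) (n : String) :
    (patterns.foldl (fun (ep : PySem.Dict String Int × List String) pat =>
        if PySem.Str.endswith pat ".*" then (ep.1, ep.2 ++ [PySem.Str.slice pat none (some (-2))])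
        else (ep.1.modify pat 0 (· + 1), ep.2)) (d, ps)).1.getD n 0
    + (((patterns.foldl (fun (ep : PySem.Dict String Int × List String) pat =>
        if PySem.Str.endswith pat ".*" then (ep.1, ep.2 ++ [PySem.Str.slice pat none (some (-2))])
        else (ep.1.modify pat 0 (· + 1), ep.2)) (d, ps)).2.countP (fun p => PySem.Str.startswith n p)) : Int)
    = d.getD n 0 + ((ps.countP (fun p => PySem.Str.startswith n p)) : Int)
      + ((patterns.countP (fun pat => pvMatch n pat)) : Int) := by
  induction patterns generalizing d ps with
  | nil => simp
  | cons pat rest ih =>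
    rw [List.foldl_cons, List.countP_cons]
    by_cases he : PySem.Str.endswith pat ".*" = true
    · rw [if_pos he, ih]
      have hm : pvMatch n pat = PySem.Str.startswith n (PySem.Str.slice pat none (some (-2))) := by
        simp only [pvMatch, if_pos he]
      rw [hm, List.countP_append]
      by_cases hs : PySem.Str.startswith n (PySem.Str.slice pat none (some (-2))) = true <;>
        simp [hs] <;> push_cast <;> ring
    · rw [if_neg he, ih]
      have hm : pvMatch n pat = (n == pat) := by simp only [pvMatch, if_neg he]
      rw [hm, PySem.Dict.getD_modify]
      by_cases hk : n = pat
      · simp [hk]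
        push_cast
        ring
      · have : (n == pat) = false := by simpa using hk
        rw [if_neg hk, this]
        simp

theorem pv_B_mult (patterns : List String) (n : String) :
    (pvBucket patterns).1.getD n 0
      + (((pvBucket patterns).2.countP (fun p => PySem.Str.startswith n p)) : Int)
    = ((patterns.countP (fun pat => pvMatch n pat)) : Int) := by
  have := pv_B_mult_gen patterns PySem.Dict.empty [] n
  simpa [pvBucket] using this

-- B's section pass as a sum
theorem pv_B_sum (sections : List (String × Int)) (m : String → Int) (t : Int) :
    sections.foldl (fun t nv => t + nv.2 * m nv.1) t
      = t + (sections.map (fun nv => nv.2 * m nv.1)).sum := by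
  induction sections generalizing t with
  | nil => simp
  | cons nv rest ih =>
    rw [List.foldl_cons, List.map_cons, List.sum_cons, ih]; ring

-- ===== VERDICT (by name: the statement is the Claim_ definition above) =====
theorem sum_matching_spec : Claim_equal_sum_matching := by
  intro sections patterns _ hpre
  unfold Spec_sum_matching
  rw [pv_A_eq sections patterns hpre,
    pv_sum_comm patterns sections (fun pat nv => if pvMatch nv.1 pat then nv.2 else 0)]
  show _ = sum_matching_alt sections patterns
  unfold sum_matching_alt
  rw [show (patterns.foldl (fun (ep : PySem.Dict String Int × List String) pat =>
      if PySem.Str.endswith pat ".*" then (ep.1, ep.2 ++ [PySem.Str.slice pat none (some (-2))])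
      else (ep.1.modify pat 0 (· + 1), ep.2)) (PySem.Dict.empty, [])) = pvBucket patterns from rfl]
  rw [pv_B_sum sections (fun n => (pvBucket patterns).1.getD n 0
      + (((pvBucket patterns).2.countP (fun p => PySem.Str.startswith n p)) : Int)) 0, zero_add]
  congr 1
  apply List.map_congr_left
  intro nv _
  rw [pv_sum_ite_count patterns nv.1 nv.2, pv_B_mult patterns nv.1]
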